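-- pv_equiv track=rewrite | github.com/zge/speechbrain | tools/utils.py | dict2tuple
-- ===== SOURCE A (Python) =====
-- def dict2tuple(dct, key='ID'):
--
--     # verify the 2nd-layer keys are the same
--     # (i.e., the keys of dict of dict are the same)
--     subkeys = [list(dct[k].keys()) for k in dct.keys()]
--     result = all(element == subkeys[0] for element in subkeys)
--     assert result, 'sub-keys are not the same for sub-dictionaries'
--
--     keys = [key, *subkeys[0]]
--     tuple_list = []
--     for k in dct.keys():
--         elements = [dct[k][kk] for kk in subkeys[0]]
--         tuple_list.append((k, *elements))
--     return tuple_list, keys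
-- ===== SOURCE B (Python) =====
-- def dict2tuple(dct, key='ID'):
--     # column-wise construction: verify once via a set of key-tuples, build one
--     # column of values per sub-key, then transpose with zip to get the rows
--     outer = list(dct)
--     subkeys = list(dct[outer[0]].keys())  # IndexError on empty dct, like A
--     assert len({tuple(d.keys()) for d in dct.values()}) == 1, \
--         'sub-keys are not the same for sub-dictionaries'
--     columns = [[dct[k][kk] for k in outer] for kk in subkeys]
--     tuple_list = list(zip(outer, *columns))
--     return tuple_list, [key, *subkeys]
-- ===== Notes on version B (the rewrite author's own statement) =====
-- stated objective: alternative
-- what changed: B builds the table column-wise (one column of values per sub-key) and transposes the columns with zip to obtain the rows, verifying key uniformity once via a set of key-tuples, instead of A's row-wise loop that builds each row by per-key lookups after a separate all-equal verification pass.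
import Mathlib
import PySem

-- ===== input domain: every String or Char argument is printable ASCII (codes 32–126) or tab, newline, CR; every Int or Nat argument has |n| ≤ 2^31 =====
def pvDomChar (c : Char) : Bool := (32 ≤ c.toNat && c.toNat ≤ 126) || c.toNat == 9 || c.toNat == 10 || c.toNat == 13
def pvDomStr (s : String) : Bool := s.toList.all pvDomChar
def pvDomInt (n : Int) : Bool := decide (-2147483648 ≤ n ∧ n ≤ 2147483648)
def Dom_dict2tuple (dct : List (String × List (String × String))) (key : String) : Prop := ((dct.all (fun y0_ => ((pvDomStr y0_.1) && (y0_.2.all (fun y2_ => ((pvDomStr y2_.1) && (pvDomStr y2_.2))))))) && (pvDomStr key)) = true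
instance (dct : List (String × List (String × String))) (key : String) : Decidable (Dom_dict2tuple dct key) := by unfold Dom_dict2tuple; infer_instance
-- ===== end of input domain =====

-- B builds the value table column-wise (one column per sub-key) and transposes with zip,
-- instead of A's row-wise loop after a separate verification pass (objective: alternative).


-- ===== PORT A =====
-- literal transliteration of A; dict lookups dct[k] / dct[k][kk] are first-match lookups
-- (PySem.Dict.get?); the .getD defaults are only reached where Python would raise
-- (KeyError/IndexError/AssertionError), and Pre_ excludes exactly those inputs.
def dict2tuple (dct : List (String × List (String × String))) (key : String) : List (List String) × List String :=
  -- subkeys = [list(dct[k].keys()) for k in dct.keys()]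
  let subkeys := (dct.map Prod.fst).map
    (fun k => (((PySem.Dict.mk dct).get? k).getD []).map Prod.fst)
  -- result = all(element == subkeys[0] for element in subkeys); assert result
  -- (subkeys[0] → headI; on the assert-failing / empty inputs Python raises: excluded by Pre_)
  let _result := subkeys.all (fun element => element == subkeys.headI)
  -- keys = [key, *subkeys[0]]
  let keys := key :: subkeys.headI
  -- for k in dct.keys(): elements = [dct[k][kk] for kk in subkeys[0]]; append (k, *elements)
  let tuple_list := (dct.map Prod.fst).map (fun k =>
    k :: subkeys.headI.map (fun kk =>
      ((PySem.Dict.mk (((PySem.Dict.mk dct).get? k).getD [])).get? kk).getD ""))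
  (tuple_list, keys)

-- ===== PORT B =====
-- zip(outer, *columns): one row per outer key while every column is non-empty,
-- consuming each column's head (exact port of Python zip's stop-at-shortest rule)
def pvZipRows : List String → List (List String) → List (List String)
  | [], _ => []
  | k :: ks, cols =>
    if cols.all (fun c => !c.isEmpty) then
      (k :: cols.map List.headI) :: pvZipRows ks (cols.map List.tail)
    else []

def dict2tuple_alt (dct : List (String × List (String × String))) (key : String) : List (List String) × List String :=
  -- outer = list(dct)
  let outer := dct.map Prod.fst
  -- subkeys = list(dct[outer[0]].keys())  (outer[0] raises on empty dct: excluded by Pre_)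
  let subkeys := (((PySem.Dict.mk dct).get? outer.headI).getD []).map Prod.fst
  -- assert len({tuple(d.keys()) for d in dct.values()}) == 1 (set → PySem.Set; raise excluded by Pre_)
  let _check := (PySem.Set.ofList (dct.map (fun p => p.2.map Prod.fst))).length == 1
  -- columns = [[dct[k][kk] for k in outer] for kk in subkeys]
  let columns := subkeys.map (fun kk => outer.map (fun k =>
    ((PySem.Dict.mk (((PySem.Dict.mk dct).get? k).getD [])).get? kk).getD ""))
  -- tuple_list = list(zip(outer, *columns))
  (pvZipRows outer columns, key :: subkeys)

-- ===== PRECONDITION & SPEC =====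
-- Pre_ excludes exactly the inputs where A raises: the empty dict (IndexError) and unequal
-- sub-key lists (AssertionError). The two Nodup conjuncts merely restate the Python dict
-- invariant (a dict never holds duplicate keys), so they exclude no representable input.
def Pre_dict2tuple (dct : List (String × List (String × String))) (key : String) : Prop :=
  dct ≠ [] ∧ (dct.map Prod.fst).Nodup ∧
  ∀ p ∈ dct, p.2.map Prod.fst = (dct.headI).2.map Prod.fst ∧ (p.2.map Prod.fst).Nodup
instance (dct : List (String × List (String × String))) (key : String) : Decidable (Pre_dict2tuple dct key) := by unfold Pre_dict2tuple; infer_instance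

def pvWitness_dict2tuple : (List (String × List (String × String))) × String :=
  ([("a", [("x", "1"), ("y", "2")]), ("b", [("x", "3"), ("y", "4")])], "ID")

def Spec_dict2tuple (dct : List (String × List (String × String))) (key : String) (out : List (List String) × List String) : Prop := out = dict2tuple_alt dct key
instance (dct : List (String × List (String × String))) (key : String) (out : List (List String) × List String) : Decidable (Spec_dict2tuple dct key out) := by unfold Spec_dict2tuple; infer_instance

-- ===== CLAIM (what is proved, stated in full; the proofs are below) =====
def Claim_equal_dict2tuple : Prop := ∀ (dct : List (String × List (String × String))) (key : String), Dom_dict2tuple dct key → Pre_dict2tuple dct key → Spec_dict2tuple dct key (dict2tuple dct key)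

-- ===== LEMMAS AND PROOFS =====

-- transposing the columns built from a fixed cell function yields the row-wise table
theorem pv_zip_transpose (f : String → String → String) (sub : List String) :
    ∀ ks : List String,
      pvZipRows ks (sub.map (fun kk => ks.map (fun k => f k kk)))
        = ks.map (fun k => k :: sub.map (fun kk => f k kk)) := by
  intro ks
  induction ks with
  | nil => simp [pvZipRows]
  | cons k ks ih =>
    simp [pvZipRows, List.map_map, Function.comp_def, ih]

-- ===== VERDICT (by name: the statement is the Claim_ definition above) =====
theorem dict2tuple_spec : Claim_equal_dict2tuple := by
  intro dct key _hdom hpre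
  obtain ⟨hne, -, -⟩ := hpre
  obtain ⟨h, t, rfl⟩ : ∃ h t, dct = h :: t := by
    cases dct with
    | nil => exact absurd rfl hne
    | cons h t => exact ⟨h, t, rfl⟩
  unfold Spec_dict2tuple dict2tuple dict2tuple_alt
  simp only [List.map_cons, List.headI]
  refine Prod.ext ?_ rfl
  exact (pv_zip_transpose
    (fun k kk => ((PySem.Dict.mk (((PySem.Dict.mk (h :: t)).get? k).getD [])).get? kk).getD "")
    ((((PySem.Dict.mk (h :: t)).get? h.1).getD []).map Prod.fst)
    (h.1 :: t.map Prod.fst)).symm
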